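-- pv_equiv track=rewrite | github.com/mdutt012025/cineagent | backend/tools/rebuild_soup.py | build_soup
-- ===== SOURCE A (Python) =====
-- LANG_MAP = {
--     'hi': 'hindi bollywood indian',
--     'ta': 'tamil kollywood indian',
--     'te': 'telugu tollywood indian',
--     'ml': 'malayalam indian',
--     'kn': 'kannada indian',
--     'ko': 'korean',
--     'ja': 'japanese',
--     'fr': 'french',
--     'es': 'spanish',
--     'de': 'german',
--     'it': 'italian',
--     'zh': 'chinese mandarin',
--     'pt': 'portuguese',
--     'ru': 'russian',
--     'ar': 'arabic',
--     'tr': 'turkish',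
--     'mr': 'marathi indian',
--     'pa': 'punjabi indian',
--     'en': 'english hollywood',
-- }
--
-- def build_soup(row):
--     parts = []
--     parts.extend([str(row.get('genre_str',   ''))] * 3)
--     parts.extend([str(row.get('keyword_str', ''))] * 6)
--     lang = str(row.get('original_language', 'en')).strip().lower()
--     parts.extend([LANG_MAP.get(lang, lang)] * 4)
--     parts.extend([str(row.get('overview', ''))] * 4)
--     tagline = str(row.get('tagline', ''))
--     if tagline and tagline != 'nan':
--         parts.extend([tagline] * 2)
--     return ' '.join(p for p in parts if p and p != 'nan')
-- ===== SOURCE B (Python) =====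
-- LANG_MAP = {
--     'hi': 'hindi bollywood indian',
--     'ta': 'tamil kollywood indian',
--     'te': 'telugu tollywood indian',
--     'ml': 'malayalam indian',
--     'kn': 'kannada indian',
--     'ko': 'korean',
--     'ja': 'japanese',
--     'fr': 'french',
--     'es': 'spanish',
--     'de': 'german',
--     'it': 'italian',
--     'zh': 'chinese mandarin',
--     'pt': 'portuguese',
--     'ru': 'russian',
--     'ar': 'arabic',
--     'tr': 'turkish',
--     'mr': 'marathi indian',
--     'pa': 'punjabi indian',
--     'en': 'english hollywood',
-- }
--
--
-- def build_soup(row):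
--     lang = str(row.get('original_language', 'en')).strip().lower()
--
--     def weave(fields):
--         # recursive, back-to-front: no parts list, no join/filter --
--         # each kept field becomes one space-separated block by string repetition
--         if not fields:
--             return ''
--         (text, weight) = fields[0]
--         tail = weave(fields[1:])
--         if not text or text == 'nan':
--             return tail
--         block = ((' ' + text) * weight)[1:]
--         return block + ' ' + tail if tail else block
--
--     return weave([
--         (str(row.get('genre_str', '')), 3),
--         (str(row.get('keyword_str', '')), 6),
--         (LANG_MAP.get(lang, lang), 4),
--         (str(row.get('overview', '')), 4),
--         (str(row.get('tagline', '')), 2),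
--     ])
-- ===== Notes on version B (the rewrite author's own statement) =====
-- stated objective: alternative
-- what changed: Instead of A's parts list built by extends, filtered and joined at the end, B recurses back-to-front over the field spec and builds the result string directly, turning each kept field into one space-separated block via string repetition ((' '+text)*weight)[1:] and gluing it to the recursively built tail, so no intermediate list, no filter and no join are used.
import Mathlib
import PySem

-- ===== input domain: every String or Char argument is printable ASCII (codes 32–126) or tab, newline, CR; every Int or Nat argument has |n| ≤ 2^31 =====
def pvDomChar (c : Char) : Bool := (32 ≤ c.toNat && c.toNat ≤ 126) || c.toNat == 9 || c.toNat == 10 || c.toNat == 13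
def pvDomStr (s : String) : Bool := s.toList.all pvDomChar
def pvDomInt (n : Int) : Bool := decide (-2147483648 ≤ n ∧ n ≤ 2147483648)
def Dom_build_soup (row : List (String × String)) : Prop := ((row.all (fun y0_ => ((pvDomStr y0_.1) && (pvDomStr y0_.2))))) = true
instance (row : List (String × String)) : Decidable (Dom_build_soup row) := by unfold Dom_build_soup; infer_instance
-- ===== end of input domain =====

-- B replaces A's parts-list construction (extend statements, tagline guard, trailing filter + join)
-- by a back-to-front recursion that builds the result string directly: each kept field becomes one
-- space-separated block via string repetition and a [1:] slice, glued to the recursively built tail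
-- (objective: alternative decomposition; same cost).
-- Both ports work on code points (List Char), exact for the string ops used (==, +, *, [1:], join).

-- 'nan' as code points, shared literal
def nanL : List Char := ['n', 'a', 'n']

-- shared module constant LANG_MAP (a dict literal), keys/values as code points
def LANG_MAP : PySem.Dict (List Char) (List Char) := PySem.Dict.ofList
  [("hi".toList, "hindi bollywood indian".toList), ("ta".toList, "tamil kollywood indian".toList),
   ("te".toList, "telugu tollywood indian".toList), ("ml".toList, "malayalam indian".toList),
   ("kn".toList, "kannada indian".toList), ("ko".toList, "korean".toList),
   ("ja".toList, "japanese".toList), ("fr".toList, "french".toList),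
   ("es".toList, "spanish".toList), ("de".toList, "german".toList),
   ("it".toList, "italian".toList), ("zh".toList, "chinese mandarin".toList),
   ("pt".toList, "portuguese".toList), ("ru".toList, "russian".toList),
   ("ar".toList, "arabic".toList), ("tr".toList, "turkish".toList),
   ("mr".toList, "marathi indian".toList), ("pa".toList, "punjabi indian".toList),
   ("en".toList, "english hollywood".toList)]

-- ===== PORT A =====
def build_soup (row : List (String × String)) : String :=
  let d : PySem.Dict String String := PySem.Dict.ofList row
  let parts : List (List Char) := []
  let parts := parts ++ List.replicate 3 (d.getD "genre_str" "").toList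
  let parts := parts ++ List.replicate 6 (d.getD "keyword_str" "").toList
  let lang := PySem.Chars.lower (PySem.Chars.strip (d.getD "original_language" "en").toList)
  let parts := parts ++ List.replicate 4 (LANG_MAP.getD lang lang)
  let parts := parts ++ List.replicate 4 (d.getD "overview" "").toList
  let tagline := (d.getD "tagline" "").toList
  let parts := if !(tagline == []) && !(tagline == nanL)
               then parts ++ List.replicate 2 tagline else parts
  String.ofList (PySem.Chars.join [' '] (parts.filter (fun p => !(p == []) && !(p == nanL))))

-- ===== PORT B =====
-- B's inner recursive helper 'weave'; '(" " + text) * weight' is flatten of replicate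
-- (exact for Python str concatenation/repetition on code points), '[1:]' is PySem.List.slice 1 none.
def weave : List (List Char × Nat) → List Char
  | [] => []
  | (text, weight) :: rest =>
      let tail := weave rest
      if text == [] || text == nanL then tail
      else
        let block := PySem.List.slice ((List.replicate weight (' ' :: text)).flatten) (some 1) none
        if !(tail == []) then block ++ [' '] ++ tail else block

def build_soup_alt (row : List (String × String)) : String :=
  let d : PySem.Dict String String := PySem.Dict.ofList row
  let lang := PySem.Chars.lower (PySem.Chars.strip (d.getD "original_language" "en").toList)
  String.ofList (weave
    [((d.getD "genre_str" "").toList, 3), ((d.getD "keyword_str" "").toList, 6),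
     (LANG_MAP.getD lang lang, 4), ((d.getD "overview" "").toList, 4),
     ((d.getD "tagline" "").toList, 2)])

-- ===== PRECONDITION & SPEC =====
def Spec_build_soup (row : List (String × String)) (out : String) : Prop := out = build_soup_alt row
instance (row : List (String × String)) (out : String) : Decidable (Spec_build_soup row out) := by unfold Spec_build_soup; infer_instance

-- ===== CLAIM (what is proved, stated in full; the proofs are below) =====
def Claim_equal_build_soup : Prop := ∀ (row : List (String × String)), Dom_build_soup row → Spec_build_soup row (build_soup row)

-- ===== LEMMAS AND PROOFS =====

-- what A's filter keeps from a 5-field spec (proof-only helper)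
def soupFold (spec : List (List Char × Nat)) : List (List Char) :=
  spec.foldr (fun tw acc => if tw.1 == [] || tw.1 == nanL then acc
                            else List.replicate tw.2 tw.1 ++ acc) []

theorem soupFold_cons (x : List Char) (w : Nat) (rest : List (List Char × Nat)) :
    soupFold ((x, w) :: rest)
      = if x == [] || x == nanL then soupFold rest
        else List.replicate w x ++ soupFold rest := rfl

theorem weave_cons (text : List Char) (weight : Nat) (rest : List (List Char × Nat)) :
    weave ((text, weight) :: rest)
      = if text == [] || text == nanL then weave rest
        else if !(weave rest == [])
             then PySem.List.slice ((List.replicate weight (' ' :: text)).flatten) (some 1) none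
                    ++ [' '] ++ weave rest
             else PySem.List.slice ((List.replicate weight (' ' :: text)).flatten) (some 1) none := rfl

theorem joinSp_append (a b : List (List Char)) (ha : a ≠ []) (hb : b ≠ []) :
    PySem.Chars.join [' '] (a ++ b)
      = PySem.Chars.join [' '] a ++ ' ' :: PySem.Chars.join [' '] b := by
  induction a with
  | nil => exact absurd rfl ha
  | cons x a ih =>
    cases a with
    | nil =>
      cases b with
      | nil => exact absurd rfl hb
      | cons y ys =>
        simp [PySem.Chars.join_cons_cons, PySem.Chars.join_singleton]
    | cons z zs =>
      have hih := ih (by simp)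
      calc PySem.Chars.join [' '] (x :: (z :: zs) ++ b)
          = x ++ [' '] ++ PySem.Chars.join [' '] ((z :: zs) ++ b) := by
            rw [show (x :: (z :: zs) ++ b) = x :: z :: (zs ++ b) from rfl]
            exact PySem.Chars.join_cons_cons [' '] x z (zs ++ b)
        _ = x ++ [' '] ++ (PySem.Chars.join [' '] (z :: zs) ++ ' ' :: PySem.Chars.join [' '] b) := by rw [hih]
        _ = (x ++ [' '] ++ PySem.Chars.join [' '] (z :: zs)) ++ ' ' :: PySem.Chars.join [' '] b := by simp
        _ = PySem.Chars.join [' '] (x :: z :: zs) ++ ' ' :: PySem.Chars.join [' '] b := by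
            rw [PySem.Chars.join_cons_cons]

-- the space-join of n+1 copies, written as Python's ((' '+x)*(n+1))[1:] computes it
theorem join_rep (n : Nat) (x : List Char) :
    PySem.Chars.join [' '] (List.replicate (n + 1) x)
      = x ++ (List.replicate n (' ' :: x)).flatten := by
  induction n with
  | zero => simp [PySem.Chars.join_singleton]
  | succ m ih =>
    rw [show List.replicate (m + 2) x = x :: x :: List.replicate m x by simp [List.replicate_succ],
        PySem.Chars.join_cons_cons,
        show x :: List.replicate m x = List.replicate (m + 1) x from by simp [List.replicate_succ],
        ih]
    simp [List.replicate_succ]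

theorem block_eq (n : Nat) (x : List Char) :
    PySem.Chars.join [' '] (List.replicate (n + 1) x)
      = ((List.replicate (n + 1) (' ' :: x)).flatten).tail := by
  rw [join_rep]
  simp [List.replicate_succ]

theorem join_rep_ne_nil (n : Nat) (x : List Char) (hx : x ≠ []) :
    PySem.Chars.join [' '] (List.replicate (n + 1) x) ≠ [] := by
  rw [join_rep]; simp [hx]

-- main invariant: B's weave computes the space-join of what A's filter keeps
theorem weave_eq (spec : List (List Char × Nat)) (h : ∀ p ∈ spec, 1 ≤ p.2) :
    weave spec = PySem.Chars.join [' '] (soupFold spec)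
      ∧ (weave spec = [] ↔ soupFold spec = []) := by
  induction spec with
  | nil => simp [weave, soupFold, PySem.Chars.join_nil]
  | cons tw rest ih =>
    obtain ⟨x, w⟩ := tw
    have hw : 1 ≤ w := h (x, w) (by simp)
    obtain ⟨w', rfl⟩ : ∃ w', w = w' + 1 := ⟨w - 1, by omega⟩
    obtain ⟨ih1, ih2⟩ := ih (fun p hp => h p (by simp [hp]))
    have hslice : PySem.List.slice ((List.replicate (w' + 1) (' ' :: x)).flatten) (some 1) none
        = ((List.replicate (w' + 1) (' ' :: x)).flatten).tail := by
      simpa using PySem.List.slice_from_one ((List.replicate (w' + 1) (' ' :: x)).flatten)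
    cases hv : (x == [] || x == nanL) with
    | true =>
      rw [weave_cons, soupFold_cons, if_pos hv, if_pos hv]
      exact ⟨ih1, ih2⟩
    | false =>
      have hx : x ≠ [] := by intro hxe; subst hxe; simp at hv
      rw [weave_cons, soupFold_cons, hv]
      simp only [Bool.false_eq_true, if_false]
      by_cases ht : weave rest = []
      · have hfnil : soupFold rest = [] := ih2.mp ht
        rw [ht, hfnil]
        simp only [List.append_nil, BEq.rfl, Bool.not_true, Bool.false_eq_true, if_false]
        rw [hslice, ← block_eq]
        exact ⟨rfl, by simp [join_rep_ne_nil w' x hx]⟩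
      · have hfne : soupFold rest ≠ [] := fun hn => ht (ih2.mpr hn)
        rw [if_pos (by simp [ht]), hslice, ← block_eq, ih1,
            joinSp_append (List.replicate (w' + 1) x) (soupFold rest) (by simp) hfne]
        refine ⟨by simp, ?_⟩
        constructor
        · intro hn; simp at hn
        · intro hn; exact absurd hn (by simp)

-- appending after a kept-or-dropped block, in soupFold's shape
theorem if_nil_append {α : Type} (c : Prop) [Decidable c] (a b : List α) :
    (if c then ([] : List α) else a) ++ b = if c then b else a ++ b := by
  split <;> simp

-- A's filtered parts list IS the soupFold of B's spec
theorem filter_eq_soupFold (g k l o t : List Char) :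
    ((if !(t == []) && !(t == nanL)
      then (((([] : List (List Char)) ++ List.replicate 3 g) ++ List.replicate 6 k)
              ++ List.replicate 4 l ++ List.replicate 4 o) ++ List.replicate 2 t
      else ((([] : List (List Char)) ++ List.replicate 3 g) ++ List.replicate 6 k)
              ++ List.replicate 4 l ++ List.replicate 4 o).filter
        (fun p => !(p == []) && !(p == nanL)))
      = soupFold [(g, 3), (k, 6), (l, 4), (o, 4), (t, 2)] := by
  have hrep : ∀ (n : Nat) (x : List Char) (rest : List (List Char)),
      List.filter (fun p => !(p == []) && !(p == nanL)) (List.replicate n x ++ rest)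
        = (if x == [] || x == nanL then [] else List.replicate n x)
            ++ List.filter (fun p => !(p == []) && !(p == nanL)) rest := by
    intro n x rest
    rw [List.filter_append, List.filter_replicate]
    cases hx : (x == []) <;> cases hn : (x == nanL) <;> simp [hx, hn]
  have hguard : (if !(t == []) && !(t == nanL)
      then (((([] : List (List Char)) ++ List.replicate 3 g) ++ List.replicate 6 k)
              ++ List.replicate 4 l ++ List.replicate 4 o) ++ List.replicate 2 t
      else ((([] : List (List Char)) ++ List.replicate 3 g) ++ List.replicate 6 k)
              ++ List.replicate 4 l ++ List.replicate 4 o)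
      = (((([] : List (List Char)) ++ List.replicate 3 g) ++ List.replicate 6 k)
              ++ List.replicate 4 l ++ List.replicate 4 o)
          ++ (if !(t == []) && !(t == nanL) then List.replicate 2 t else []) := by
    split <;> simp
  have htag : List.filter (fun p => !(p == []) && !(p == nanL))
        (if !(t == []) && !(t == nanL) then List.replicate 2 t else [])
      = (if t == [] || t == nanL then [] else List.replicate 2 t) := by
    cases hx : (t == []) <;> cases hn : (t == nanL) <;> simp [hx, hn] <;>
      exact ⟨by simpa using hx, by simpa using hn⟩
  rw [hguard]
  simp only [List.nil_append, List.append_assoc]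
  rw [hrep 3 g, hrep 6 k, hrep 4 l, hrep 4 o, htag]
  simp only [soupFold, List.foldr, List.append_nil, if_nil_append]

-- ===== VERDICT (by name: the statement is the Claim_ definition above) =====
theorem build_soup_spec : Claim_equal_build_soup := by
  intro row _
  unfold Spec_build_soup build_soup build_soup_alt
  simp only []
  apply congrArg String.ofList
  rw [filter_eq_soupFold]
  exact ((weave_eq _ (by intro p hp; fin_cases hp <;> simp)).1).symm
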